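-- pv_equiv track=rewrite | github.com/leo-zhang-93/adventOfCode | 2023/script_20231201.py | check
-- ===== SOURCE A (Python) =====
-- def check(string, idx):
--     ls = ['one', 'two', 'three', 'four', 'five', 'six', 'seven', 'eight', 'nine']
--     for i in range(9):
--         item = ls[i]
--         length = len(item)
--         if string[idx:(idx + length)] == item:
--             return True, str(i + 1)
--     return False, None
-- ===== SOURCE B (Python) =====
-- # DFA walk over a trie of the nine digit words (flat transition table);
-- # reads one character of the string per step instead of comparing nine slices.
-- TRANS = {
--     (0, 'o'): 1, (1, 'n'): 2, (2, 'e'): 3,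
--     (0, 't'): 4, (4, 'w'): 5, (5, 'o'): 6,
--     (4, 'h'): 7, (7, 'r'): 8, (8, 'e'): 9, (9, 'e'): 10,
--     (0, 'f'): 11, (11, 'o'): 12, (12, 'u'): 13, (13, 'r'): 14,
--     (11, 'i'): 15, (15, 'v'): 16, (16, 'e'): 17,
--     (0, 's'): 18, (18, 'i'): 19, (19, 'x'): 20,
--     (18, 'e'): 21, (21, 'v'): 22, (22, 'e'): 23, (23, 'n'): 24,
--     (0, 'e'): 25, (25, 'i'): 26, (26, 'g'): 27, (27, 'h'): 28, (28, 't'): 29,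
--     (0, 'n'): 30, (30, 'i'): 31, (31, 'n'): 32, (32, 'e'): 33,
-- }
-- ACCEPT = {3: '1', 6: '2', 10: '3', 14: '4', 17: '5', 20: '6', 24: '7', 29: '8', 33: '9'}
--
--
-- def check(string, idx):
--     state, j = 0, idx
--     for _ in range(6):  # the longest word has 5 letters
--         if state in ACCEPT:
--             return True, ACCEPT[state]
--         state = TRANS.get((state, string[j:j + 1]))
--         if state is None:
--             return False, None
--         j += 1
--     return False, None  # unreachable: every length-5 path ends in an accepting state
-- ===== Notes on version B (the rewrite author's own statement) =====
-- stated objective: alternative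
-- what changed: B replaces A's loop of nine slice-vs-word comparisons by a single left-to-right walk over a precomputed trie of the digit words, encoded as a flat DFA transition table keyed by (state, character), reading one character of the string per step.
import Mathlib
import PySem

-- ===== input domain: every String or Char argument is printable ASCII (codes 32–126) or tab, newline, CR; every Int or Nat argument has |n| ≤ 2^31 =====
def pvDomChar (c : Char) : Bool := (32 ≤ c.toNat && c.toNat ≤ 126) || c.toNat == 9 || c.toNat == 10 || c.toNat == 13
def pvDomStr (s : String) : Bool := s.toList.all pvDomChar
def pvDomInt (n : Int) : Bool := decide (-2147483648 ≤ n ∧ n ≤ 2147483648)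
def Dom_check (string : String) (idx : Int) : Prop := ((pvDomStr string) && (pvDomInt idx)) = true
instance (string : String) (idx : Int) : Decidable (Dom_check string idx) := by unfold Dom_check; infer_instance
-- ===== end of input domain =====

-- B replaces A's nine slice-vs-word comparisons by a single left-to-right walk over a
-- precomputed trie of the digit words (a flat DFA transition table keyed by
-- (state, character)), reading one character of the string per step.

-- ===== PORT A =====
def lsA : List String := ["one", "two", "three", "four", "five", "six", "seven", "eight", "nine"]

def checkLoop (string : String) (idx : Int) : List Int → Bool × Option String
  | [] => (false, none)
  | i :: rest =>
    let item := PySem.List.pyGetD lsA i ""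
    let length := PySem.Str.len item
    if PySem.Str.slice string (some idx) (some (idx + length)) == item then
      (true, some (PySem.Int.toStr (i + 1)))
    else checkLoop string idx rest

def check (string : String) (idx : Int) : Bool × Option String :=
  checkLoop string idx (PySem.List.pyRange 0 9 1)

-- ===== PORT B =====
def pvTrans : PySem.Dict (Int × String) Int := PySem.Dict.ofList [((0,"o"),1), ((1,"n"),2), ((2,"e"),3), ((0,"t"),4), ((4,"w"),5), ((5,"o"),6), ((4,"h"),7), ((7,"r"),8), ((8,"e"),9), ((9,"e"),10), ((0,"f"),11), ((11,"o"),12), ((12,"u"),13), ((13,"r"),14), ((11,"i"),15), ((15,"v"),16), ((16,"e"),17), ((0,"s"),18), ((18,"i"),19), ((19,"x"),20), ((18,"e"),21), ((21,"v"),22), ((22,"e"),23), ((23,"n"),24), ((0,"e"),25), ((25,"i"),26), ((26,"g"),27), ((27,"h"),28), ((28,"t"),29), ((0,"n"),30), ((30,"i"),31), ((31,"n"),32), ((32,"e"),33)]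

def pvAccept : PySem.Dict Int String := PySem.Dict.ofList [(3,"1"), (6,"2"), (10,"3"), (14,"4"), (17,"5"), (20,"6"), (24,"7"), (29,"8"), (33,"9")]

def altWalk (string : String) : Nat → Int → Int → Bool × Option String
  | 0, _, _ => (false, none)  -- the for-loop's unreachable fall-through
  | fuel+1, state, j =>
    match PySem.Dict.get? pvAccept state with
    | some d => (true, some d)
    | none =>
      match PySem.Dict.get? pvTrans (state, PySem.Str.slice string (some j) (some (j+1))) with
      | some st => altWalk string fuel st (j+1)
      | none => (false, none)

def check_alt (string : String) (idx : Int) : Bool × Option String :=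
  altWalk string 6 0 idx

-- ===== PRECONDITION & SPEC =====
def Spec_check (string : String) (idx : Int) (out : Bool × Option String) : Prop := out = check_alt string idx
instance (string : String) (idx : Int) (out : Bool × Option String) : Decidable (Spec_check string idx out) := by unfold Spec_check; infer_instance

-- ===== CLAIM (what is proved, stated in full; the proofs are below) =====
def Claim_equal_check : Prop := ∀ (string : String) (idx : Int), Dom_check string idx → Spec_check string idx (check string idx)

-- ===== LEMMAS AND PROOFS =====

-- "string[idx:idx+len(w)] == w", the match test A performs for each word w
def m (string : String) (idx : Int) (w : String) : Bool :=
  PySem.Str.slice string (some idx) (some (idx + PySem.Str.len w)) == w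

-- A's loop, written as the chain of the nine match tests
lemma check_eq (string : String) (idx : Int) : check string idx =
  (if m string idx "one" then (true, some "1") else
   if m string idx "two" then (true, some "2") else
   if m string idx "three" then (true, some "3") else
   if m string idx "four" then (true, some "4") else
   if m string idx "five" then (true, some "5") else
   if m string idx "six" then (true, some "6") else
   if m string idx "seven" then (true, some "7") else
   if m string idx "eight" then (true, some "8") else
   if m string idx "nine" then (true, some "9") else
   (false, none)) := rfl

-- clampIdx written as one Int formula (for omega)
lemma clampIdx_cases (n : Nat) (i : Int) :
    (↑(PySem.List.clampIdx n i) : Int) = if i < 0 then max 0 (↑n + i) else min ↑n i := by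
  unfold PySem.List.clampIdx; split_ifs <;> omega

-- a one-character slice pins down the clamped bounds
lemma clamp_succ_of_singleton (s : List Char) (a : Int) (c : Char)
    (h : PySem.List.slice s (some a) (some (a+1)) = [c]) :
    PySem.List.clampIdx s.length (a+1) = PySem.List.clampIdx s.length a + 1 ∧
      PySem.List.clampIdx s.length a < s.length := by
  have hl := congrArg List.length h
  simp only [PySem.List.slice, List.length_take, List.length_drop, List.length_cons,
    List.length_nil] at hl
  have hA := clampIdx_cases s.length a
  have hA1 := clampIdx_cases s.length (a+1)
  split_ifs at hA hA1 <;> omega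

lemma sliceL_self (s : List Char) (a : Int) :
    PySem.List.slice s (some a) (some a) = [] := by
  simp [PySem.List.slice]

-- a matched single character extends a slice on the left
lemma sliceL_cons (s : List Char) (a b : Int) (c : Char)
    (h : PySem.List.slice s (some a) (some (a+1)) = [c])
    (hge : PySem.List.clampIdx s.length (a+1) ≤ PySem.List.clampIdx s.length b) :
    PySem.List.slice s (some a) (some b) = c :: PySem.List.slice s (some (a+1)) (some b) := by
  obtain ⟨h1, h2⟩ := clamp_succ_of_singleton s a c h
  rw [h1] at hge
  simp only [PySem.List.slice] at h ⊢
  rw [h1] at h ⊢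
  rw [show PySem.List.clampIdx s.length a + 1 - PySem.List.clampIdx s.length a = 1 by omega] at h
  cases hd : List.drop (PySem.List.clampIdx s.length a) s with
  | nil => rw [hd] at h; simp at h
  | cons x tl =>
    rw [hd] at h
    simp only [List.take_succ_cons, List.cons.injEq] at h
    obtain ⟨rfl, -⟩ := h
    have htl : tl = List.drop (PySem.List.clampIdx s.length a + 1) s := by
      rw [← List.tail_drop, hd]; rfl
    rw [show PySem.List.clampIdx s.length b - PySem.List.clampIdx s.length a
        = (PySem.List.clampIdx s.length b - (PySem.List.clampIdx s.length a + 1)) + 1 by omega,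
      List.take_succ_cons, htl]

-- a full-length slice determines its first character's one-character slice
lemma sliceL_head (s : List Char) (a b : Int) (c : Char) (t : List Char)
    (h : PySem.List.slice s (some a) (some b) = c :: t)
    (hb : b = a + 1 + (t.length : Int)) :
    PySem.List.slice s (some a) (some (a+1)) = [c] := by
  subst hb
  have hl := congrArg List.length h
  simp only [PySem.List.slice, List.length_take, List.length_drop, List.length_cons] at hl h ⊢
  have hA := clampIdx_cases s.length a
  have hA1 := clampIdx_cases s.length (a+1)
  have hB := clampIdx_cases s.length (a + 1 + (t.length : Int))
  have h1 : PySem.List.clampIdx s.length (a+1) = PySem.List.clampIdx s.length a + 1 := by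
    split_ifs at hA hA1 hB <;> omega
  have hge : 1 ≤ PySem.List.clampIdx s.length (a + 1 + (t.length : Int)) - PySem.List.clampIdx s.length a := by
    split_ifs at hA hA1 hB <;> omega
  rw [h1, show PySem.List.clampIdx s.length a + 1 - PySem.List.clampIdx s.length a = 1 by omega]
  have h2 := congrArg (List.take 1) h
  rw [List.take_take, min_eq_left hge] at h2
  simpa using h2

-- ... and the remaining slice is the tail
lemma sliceL_tail (s : List Char) (a b : Int) (c : Char) (t : List Char)
    (h : PySem.List.slice s (some a) (some b) = c :: t)
    (hb : b = a + 1 + (t.length : Int)) :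
    PySem.List.slice s (some (a+1)) (some b) = t := by
  have hh := sliceL_head s a b c t h hb
  have hge : PySem.List.clampIdx s.length (a+1) ≤ PySem.List.clampIdx s.length b := by
    have hl := congrArg List.length h
    simp only [PySem.List.slice, List.length_take, List.length_drop, List.length_cons] at hl
    obtain ⟨h1, -⟩ := clamp_succ_of_singleton s a c hh
    omega
  rw [sliceL_cons s a b c hh hge] at h
  exact (List.cons.injEq _ _ _ _ ▸ h).2

-- bridges between the String-level walk and the List-level slice lemmas
lemma chS_of_chL (s : String) (a : Int) (c : Char)
    (h : PySem.List.slice s.toList (some a) (some (a+1)) = [c]) :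
    PySem.Str.slice s (some a) (some (a+1)) = String.ofList [c] := by
  apply String.toList_inj.mp
  rw [PySem.Str.toList_slice, PySem.Chars.slice_eq_listSlice, h]
  simp

lemma chL_of_chS (s : String) (a : Int) (c : Char)
    (h : PySem.Str.slice s (some a) (some (a+1)) = String.ofList [c]) :
    PySem.List.slice s.toList (some a) (some (a+1)) = [c] := by
  have h2 := congrArg String.toList h
  rw [PySem.Str.toList_slice, PySem.Chars.slice_eq_listSlice] at h2
  simpa using h2

-- the literal transition table, in Dict.mk form
lemma pvTrans_mk : pvTrans = PySem.Dict.mk [((0,"o"),1), ((1,"n"),2), ((2,"e"),3), ((0,"t"),4), ((4,"w"),5), ((5,"o"),6), ((4,"h"),7), ((7,"r"),8), ((8,"e"),9), ((9,"e"),10), ((0,"f"),11), ((11,"o"),12), ((12,"u"),13), ((13,"r"),14), ((11,"i"),15), ((15,"v"),16), ((16,"e"),17), ((0,"s"),18), ((18,"i"),19), ((19,"x"),20), ((18,"e"),21), ((21,"v"),22), ((22,"e"),23), ((23,"n"),24), ((0,"e"),25), ((25,"i"),26), ((26,"g"),27), ((27,"h"),28), ((28,"t"),29), ((0,"n"),30),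 ((30,"i"),31), ((31,"n"),32), ((32,"e"),33)] := by decide

-- table lookups evaluated (cited by the branch proofs below)
lemma edge0_o : PySem.Dict.get? pvTrans ((0 : Int), String.ofList ['o']) = some 1 := rfl
lemma edge1_n : PySem.Dict.get? pvTrans ((1 : Int), String.ofList ['n']) = some 2 := rfl
lemma edge2_e : PySem.Dict.get? pvTrans ((2 : Int), String.ofList ['e']) = some 3 := rfl
lemma edge0_t : PySem.Dict.get? pvTrans ((0 : Int), String.ofList ['t']) = some 4 := rfl
lemma edge4_w : PySem.Dict.get? pvTrans ((4 : Int), String.ofList ['w']) = some 5 := rfl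
lemma edge5_o : PySem.Dict.get? pvTrans ((5 : Int), String.ofList ['o']) = some 6 := rfl
lemma edge4_h : PySem.Dict.get? pvTrans ((4 : Int), String.ofList ['h']) = some 7 := rfl
lemma edge7_r : PySem.Dict.get? pvTrans ((7 : Int), String.ofList ['r']) = some 8 := rfl
lemma edge8_e : PySem.Dict.get? pvTrans ((8 : Int), String.ofList ['e']) = some 9 := rfl
lemma edge9_e : PySem.Dict.get? pvTrans ((9 : Int), String.ofList ['e']) = some 10 := rfl
lemma edge0_f : PySem.Dict.get? pvTrans ((0 : Int), String.ofList ['f']) = some 11 := rfl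
lemma edge11_o : PySem.Dict.get? pvTrans ((11 : Int), String.ofList ['o']) = some 12 := rfl
lemma edge12_u : PySem.Dict.get? pvTrans ((12 : Int), String.ofList ['u']) = some 13 := rfl
lemma edge13_r : PySem.Dict.get? pvTrans ((13 : Int), String.ofList ['r']) = some 14 := rfl
lemma edge11_i : PySem.Dict.get? pvTrans ((11 : Int), String.ofList ['i']) = some 15 := rfl
lemma edge15_v : PySem.Dict.get? pvTrans ((15 : Int), String.ofList ['v']) = some 16 := rfl
lemma edge16_e : PySem.Dict.get? pvTrans ((16 : Int), String.ofList ['e']) = some 17 := rfl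
lemma edge0_s : PySem.Dict.get? pvTrans ((0 : Int), String.ofList ['s']) = some 18 := rfl
lemma edge18_i : PySem.Dict.get? pvTrans ((18 : Int), String.ofList ['i']) = some 19 := rfl
lemma edge19_x : PySem.Dict.get? pvTrans ((19 : Int), String.ofList ['x']) = some 20 := rfl
lemma edge18_e : PySem.Dict.get? pvTrans ((18 : Int), String.ofList ['e']) = some 21 := rfl
lemma edge21_v : PySem.Dict.get? pvTrans ((21 : Int), String.ofList ['v']) = some 22 := rfl
lemma edge22_e : PySem.Dict.get? pvTrans ((22 : Int), String.ofList ['e']) = some 23 := rfl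
lemma edge23_n : PySem.Dict.get? pvTrans ((23 : Int), String.ofList ['n']) = some 24 := rfl
lemma edge0_e : PySem.Dict.get? pvTrans ((0 : Int), String.ofList ['e']) = some 25 := rfl
lemma edge25_i : PySem.Dict.get? pvTrans ((25 : Int), String.ofList ['i']) = some 26 := rfl
lemma edge26_g : PySem.Dict.get? pvTrans ((26 : Int), String.ofList ['g']) = some 27 := rfl
lemma edge27_h : PySem.Dict.get? pvTrans ((27 : Int), String.ofList ['h']) = some 28 := rfl
lemma edge28_t : PySem.Dict.get? pvTrans ((28 : Int), String.ofList ['t']) = some 29 := rfl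
lemma edge0_n : PySem.Dict.get? pvTrans ((0 : Int), String.ofList ['n']) = some 30 := rfl
lemma edge30_i : PySem.Dict.get? pvTrans ((30 : Int), String.ofList ['i']) = some 31 := rfl
lemma edge31_n : PySem.Dict.get? pvTrans ((31 : Int), String.ofList ['n']) = some 32 := rfl
lemma edge32_e : PySem.Dict.get? pvTrans ((32 : Int), String.ofList ['e']) = some 33 := rfl
lemma accN0 : PySem.Dict.get? pvAccept (0 : Int) = none := rfl
lemma accN1 : PySem.Dict.get? pvAccept (1 : Int) = none := rfl
lemma accN2 : PySem.Dict.get? pvAccept (2 : Int) = none := rfl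
lemma acc3 : PySem.Dict.get? pvAccept (3 : Int) = some "1" := rfl
lemma accN4 : PySem.Dict.get? pvAccept (4 : Int) = none := rfl
lemma accN5 : PySem.Dict.get? pvAccept (5 : Int) = none := rfl
lemma acc6 : PySem.Dict.get? pvAccept (6 : Int) = some "2" := rfl
lemma accN7 : PySem.Dict.get? pvAccept (7 : Int) = none := rfl
lemma accN8 : PySem.Dict.get? pvAccept (8 : Int) = none := rfl
lemma accN9 : PySem.Dict.get? pvAccept (9 : Int) = none := rfl
lemma acc10 : PySem.Dict.get? pvAccept (10 : Int) = some "3" := rfl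
lemma accN11 : PySem.Dict.get? pvAccept (11 : Int) = none := rfl
lemma accN12 : PySem.Dict.get? pvAccept (12 : Int) = none := rfl
lemma accN13 : PySem.Dict.get? pvAccept (13 : Int) = none := rfl
lemma acc14 : PySem.Dict.get? pvAccept (14 : Int) = some "4" := rfl
lemma accN15 : PySem.Dict.get? pvAccept (15 : Int) = none := rfl
lemma accN16 : PySem.Dict.get? pvAccept (16 : Int) = none := rfl
lemma acc17 : PySem.Dict.get? pvAccept (17 : Int) = some "5" := rfl
lemma accN18 : PySem.Dict.get? pvAccept (18 : Int) = none := rfl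
lemma accN19 : PySem.Dict.get? pvAccept (19 : Int) = none := rfl
lemma acc20 : PySem.Dict.get? pvAccept (20 : Int) = some "6" := rfl
lemma accN21 : PySem.Dict.get? pvAccept (21 : Int) = none := rfl
lemma accN22 : PySem.Dict.get? pvAccept (22 : Int) = none := rfl
lemma accN23 : PySem.Dict.get? pvAccept (23 : Int) = none := rfl
lemma acc24 : PySem.Dict.get? pvAccept (24 : Int) = some "7" := rfl
lemma accN25 : PySem.Dict.get? pvAccept (25 : Int) = none := rfl
lemma accN26 : PySem.Dict.get? pvAccept (26 : Int) = none := rfl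
lemma accN27 : PySem.Dict.get? pvAccept (27 : Int) = none := rfl
lemma accN28 : PySem.Dict.get? pvAccept (28 : Int) = none := rfl
lemma acc29 : PySem.Dict.get? pvAccept (29 : Int) = some "8" := rfl
lemma accN30 : PySem.Dict.get? pvAccept (30 : Int) = none := rfl
lemma accN31 : PySem.Dict.get? pvAccept (31 : Int) = none := rfl
lemma accN32 : PySem.Dict.get? pvAccept (32 : Int) = none := rfl
lemma acc33 : PySem.Dict.get? pvAccept (33 : Int) = some "9" := rfl

-- a state rejects every character that is not one of its outgoing edges
lemma tn0 (c : String) (h1 : c ≠ String.ofList ['o']) (h2 : c ≠ String.ofList ['t']) (h3 : c ≠ String.ofList ['f']) (h4 : c ≠ String.ofList ['s']) (h5 : c ≠ String.ofList ['e']) (h6 : c ≠ String.ofList ['n']) :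
    PySem.Dict.get? pvTrans ((0 : Int), c) = none := by
  rw [pvTrans_mk]
  simp [Ne.symm h1, Ne.symm h2, Ne.symm h3, Ne.symm h4, Ne.symm h5, Ne.symm h6, PySem.Dict.get?]
lemma tn1 (c : String) (h1 : c ≠ String.ofList ['n']) :
    PySem.Dict.get? pvTrans ((1 : Int), c) = none := by
  rw [pvTrans_mk]
  simp [Ne.symm h1, PySem.Dict.get?]
lemma tn2 (c : String) (h1 : c ≠ String.ofList ['e']) :
    PySem.Dict.get? pvTrans ((2 : Int), c) = none := by
  rw [pvTrans_mk]
  simp [Ne.symm h1, PySem.Dict.get?]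
lemma tn4 (c : String) (h1 : c ≠ String.ofList ['w']) (h2 : c ≠ String.ofList ['h']) :
    PySem.Dict.get? pvTrans ((4 : Int), c) = none := by
  rw [pvTrans_mk]
  simp [Ne.symm h1, Ne.symm h2, PySem.Dict.get?]
lemma tn5 (c : String) (h1 : c ≠ String.ofList ['o']) :
    PySem.Dict.get? pvTrans ((5 : Int), c) = none := by
  rw [pvTrans_mk]
  simp [Ne.symm h1, PySem.Dict.get?]
lemma tn7 (c : String) (h1 : c ≠ String.ofList ['r']) :
    PySem.Dict.get? pvTrans ((7 : Int), c) = none := by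
  rw [pvTrans_mk]
  simp [Ne.symm h1, PySem.Dict.get?]
lemma tn8 (c : String) (h1 : c ≠ String.ofList ['e']) :
    PySem.Dict.get? pvTrans ((8 : Int), c) = none := by
  rw [pvTrans_mk]
  simp [Ne.symm h1, PySem.Dict.get?]
lemma tn9 (c : String) (h1 : c ≠ String.ofList ['e']) :
    PySem.Dict.get? pvTrans ((9 : Int), c) = none := by
  rw [pvTrans_mk]
  simp [Ne.symm h1, PySem.Dict.get?]
lemma tn11 (c : String) (h1 : c ≠ String.ofList ['o']) (h2 : c ≠ String.ofList ['i']) :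
    PySem.Dict.get? pvTrans ((11 : Int), c) = none := by
  rw [pvTrans_mk]
  simp [Ne.symm h1, Ne.symm h2, PySem.Dict.get?]
lemma tn12 (c : String) (h1 : c ≠ String.ofList ['u']) :
    PySem.Dict.get? pvTrans ((12 : Int), c) = none := by
  rw [pvTrans_mk]
  simp [Ne.symm h1, PySem.Dict.get?]
lemma tn13 (c : String) (h1 : c ≠ String.ofList ['r']) :
    PySem.Dict.get? pvTrans ((13 : Int), c) = none := by
  rw [pvTrans_mk]
  simp [Ne.symm h1, PySem.Dict.get?]
lemma tn15 (c : String) (h1 : c ≠ String.ofList ['v']) :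
    PySem.Dict.get? pvTrans ((15 : Int), c) = none := by
  rw [pvTrans_mk]
  simp [Ne.symm h1, PySem.Dict.get?]
lemma tn16 (c : String) (h1 : c ≠ String.ofList ['e']) :
    PySem.Dict.get? pvTrans ((16 : Int), c) = none := by
  rw [pvTrans_mk]
  simp [Ne.symm h1, PySem.Dict.get?]
lemma tn18 (c : String) (h1 : c ≠ String.ofList ['i']) (h2 : c ≠ String.ofList ['e']) :
    PySem.Dict.get? pvTrans ((18 : Int), c) = none := by
  rw [pvTrans_mk]
  simp [Ne.symm h1, Ne.symm h2, PySem.Dict.get?]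
lemma tn19 (c : String) (h1 : c ≠ String.ofList ['x']) :
    PySem.Dict.get? pvTrans ((19 : Int), c) = none := by
  rw [pvTrans_mk]
  simp [Ne.symm h1, PySem.Dict.get?]
lemma tn21 (c : String) (h1 : c ≠ String.ofList ['v']) :
    PySem.Dict.get? pvTrans ((21 : Int), c) = none := by
  rw [pvTrans_mk]
  simp [Ne.symm h1, PySem.Dict.get?]
lemma tn22 (c : String) (h1 : c ≠ String.ofList ['e']) :
    PySem.Dict.get? pvTrans ((22 : Int), c) = none := by
  rw [pvTrans_mk]
  simp [Ne.symm h1, PySem.Dict.get?]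
lemma tn23 (c : String) (h1 : c ≠ String.ofList ['n']) :
    PySem.Dict.get? pvTrans ((23 : Int), c) = none := by
  rw [pvTrans_mk]
  simp [Ne.symm h1, PySem.Dict.get?]
lemma tn25 (c : String) (h1 : c ≠ String.ofList ['i']) :
    PySem.Dict.get? pvTrans ((25 : Int), c) = none := by
  rw [pvTrans_mk]
  simp [Ne.symm h1, PySem.Dict.get?]
lemma tn26 (c : String) (h1 : c ≠ String.ofList ['g']) :
    PySem.Dict.get? pvTrans ((26 : Int), c) = none := by
  rw [pvTrans_mk]
  simp [Ne.symm h1, PySem.Dict.get?]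
lemma tn27 (c : String) (h1 : c ≠ String.ofList ['h']) :
    PySem.Dict.get? pvTrans ((27 : Int), c) = none := by
  rw [pvTrans_mk]
  simp [Ne.symm h1, PySem.Dict.get?]
lemma tn28 (c : String) (h1 : c ≠ String.ofList ['t']) :
    PySem.Dict.get? pvTrans ((28 : Int), c) = none := by
  rw [pvTrans_mk]
  simp [Ne.symm h1, PySem.Dict.get?]
lemma tn30 (c : String) (h1 : c ≠ String.ofList ['i']) :
    PySem.Dict.get? pvTrans ((30 : Int), c) = none := by
  rw [pvTrans_mk]
  simp [Ne.symm h1, PySem.Dict.get?]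
lemma tn31 (c : String) (h1 : c ≠ String.ofList ['n']) :
    PySem.Dict.get? pvTrans ((31 : Int), c) = none := by
  rw [pvTrans_mk]
  simp [Ne.symm h1, PySem.Dict.get?]
lemma tn32 (c : String) (h1 : c ≠ String.ofList ['e']) :
    PySem.Dict.get? pvTrans ((32 : Int), c) = none := by
  rw [pvTrans_mk]
  simp [Ne.symm h1, PySem.Dict.get?]

-- if word k matches, the walk accepts with its digit
lemma fwd1 (s : String) (idx : Int) (h : m s idx "one" = true) :
    check_alt s idx = (true, some "1") := by
  unfold m at h
  rw [show (PySem.Str.len "one") = (3 : Int) from rfl] at h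
  have hs := eq_of_beq h
  have h0 : PySem.List.slice s.toList (some idx) (some (idx+3)) = ['o', 'n', 'e'] := by
    have h2 := congrArg String.toList hs
    rw [PySem.Str.toList_slice, PySem.Chars.slice_eq_listSlice,
      show "one".toList = ['o', 'n', 'e'] from rfl] at h2
    exact h2
  have e0 := sliceL_head s.toList (idx) (idx+3) 'o' ['n', 'e'] h0 (by simp only [List.length_cons, List.length_nil]; omega)
  have t0 := sliceL_tail s.toList (idx) (idx+3) 'o' ['n', 'e'] h0 (by simp only [List.length_cons, List.length_nil]; omega)
  have E0 := chS_of_chL s (idx) 'o' e0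
  have e1 := sliceL_head s.toList (idx + 1) (idx+3) 'n' ['e'] t0 (by simp only [List.length_cons, List.length_nil]; omega)
  have t1 := sliceL_tail s.toList (idx + 1) (idx+3) 'n' ['e'] t0 (by simp only [List.length_cons, List.length_nil]; omega)
  have E1 := chS_of_chL s (idx + 1) 'n' e1
  have e2 := sliceL_head s.toList (idx + 1 + 1) (idx+3) 'e' [] t1 (by simp only [List.length_nil]; omega)
  have E2 := chS_of_chL s (idx + 1 + 1) 'e' e2
  simp only [check_alt, altWalk, E0, E1, E2, accN0, edge0_o, accN1, edge1_n, accN2, edge2_e, acc3]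

lemma fwd2 (s : String) (idx : Int) (h : m s idx "two" = true) :
    check_alt s idx = (true, some "2") := by
  unfold m at h
  rw [show (PySem.Str.len "two") = (3 : Int) from rfl] at h
  have hs := eq_of_beq h
  have h0 : PySem.List.slice s.toList (some idx) (some (idx+3)) = ['t', 'w', 'o'] := by
    have h2 := congrArg String.toList hs
    rw [PySem.Str.toList_slice, PySem.Chars.slice_eq_listSlice,
      show "two".toList = ['t', 'w', 'o'] from rfl] at h2
    exact h2
  have e0 := sliceL_head s.toList (idx) (idx+3) 't' ['w', 'o'] h0 (by simp only [List.length_cons, List.length_nil]; omega)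
  have t0 := sliceL_tail s.toList (idx) (idx+3) 't' ['w', 'o'] h0 (by simp only [List.length_cons, List.length_nil]; omega)
  have E0 := chS_of_chL s (idx) 't' e0
  have e1 := sliceL_head s.toList (idx + 1) (idx+3) 'w' ['o'] t0 (by simp only [List.length_cons, List.length_nil]; omega)
  have t1 := sliceL_tail s.toList (idx + 1) (idx+3) 'w' ['o'] t0 (by simp only [List.length_cons, List.length_nil]; omega)
  have E1 := chS_of_chL s (idx + 1) 'w' e1
  have e2 := sliceL_head s.toList (idx + 1 + 1) (idx+3) 'o' [] t1 (by simp only [List.length_nil]; omega)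
  have E2 := chS_of_chL s (idx + 1 + 1) 'o' e2
  simp only [check_alt, altWalk, E0, E1, E2, accN0, edge0_t, accN4, edge4_w, accN5, edge5_o, acc6]

lemma fwd3 (s : String) (idx : Int) (h : m s idx "three" = true) :
    check_alt s idx = (true, some "3") := by
  unfold m at h
  rw [show (PySem.Str.len "three") = (5 : Int) from rfl] at h
  have hs := eq_of_beq h
  have h0 : PySem.List.slice s.toList (some idx) (some (idx+5)) = ['t', 'h', 'r', 'e', 'e'] := by
    have h2 := congrArg String.toList hs
    rw [PySem.Str.toList_slice, PySem.Chars.slice_eq_listSlice,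
      show "three".toList = ['t', 'h', 'r', 'e', 'e'] from rfl] at h2
    exact h2
  have e0 := sliceL_head s.toList (idx) (idx+5) 't' ['h', 'r', 'e', 'e'] h0 (by simp only [List.length_cons, List.length_nil]; omega)
  have t0 := sliceL_tail s.toList (idx) (idx+5) 't' ['h', 'r', 'e', 'e'] h0 (by simp only [List.length_cons, List.length_nil]; omega)
  have E0 := chS_of_chL s (idx) 't' e0
  have e1 := sliceL_head s.toList (idx + 1) (idx+5) 'h' ['r', 'e', 'e'] t0 (by simp only [List.length_cons, List.length_nil]; omega)
  have t1 := sliceL_tail s.toList (idx + 1) (idx+5) 'h' ['r', 'e', 'e'] t0 (by simp only [List.length_cons, List.length_nil]; omega)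
  have E1 := chS_of_chL s (idx + 1) 'h' e1
  have e2 := sliceL_head s.toList (idx + 1 + 1) (idx+5) 'r' ['e', 'e'] t1 (by simp only [List.length_cons, List.length_nil]; omega)
  have t2 := sliceL_tail s.toList (idx + 1 + 1) (idx+5) 'r' ['e', 'e'] t1 (by simp only [List.length_cons, List.length_nil]; omega)
  have E2 := chS_of_chL s (idx + 1 + 1) 'r' e2
  have e3 := sliceL_head s.toList (idx + 1 + 1 + 1) (idx+5) 'e' ['e'] t2 (by simp only [List.length_cons, List.length_nil]; omega)
  have t3 := sliceL_tail s.toList (idx + 1 + 1 + 1) (idx+5) 'e' ['e'] t2 (by simp only [List.length_cons, List.length_nil]; omega)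
  have E3 := chS_of_chL s (idx + 1 + 1 + 1) 'e' e3
  have e4 := sliceL_head s.toList (idx + 1 + 1 + 1 + 1) (idx+5) 'e' [] t3 (by simp only [List.length_nil]; omega)
  have E4 := chS_of_chL s (idx + 1 + 1 + 1 + 1) 'e' e4
  simp only [check_alt, altWalk, E0, E1, E2, E3, E4, accN0, edge0_t, accN4, edge4_h, accN7, edge7_r, accN8, edge8_e, accN9, edge9_e, acc10]

lemma fwd4 (s : String) (idx : Int) (h : m s idx "four" = true) :
    check_alt s idx = (true, some "4") := by
  unfold m at h
  rw [show (PySem.Str.len "four") = (4 : Int) from rfl] at h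
  have hs := eq_of_beq h
  have h0 : PySem.List.slice s.toList (some idx) (some (idx+4)) = ['f', 'o', 'u', 'r'] := by
    have h2 := congrArg String.toList hs
    rw [PySem.Str.toList_slice, PySem.Chars.slice_eq_listSlice,
      show "four".toList = ['f', 'o', 'u', 'r'] from rfl] at h2
    exact h2
  have e0 := sliceL_head s.toList (idx) (idx+4) 'f' ['o', 'u', 'r'] h0 (by simp only [List.length_cons, List.length_nil]; omega)
  have t0 := sliceL_tail s.toList (idx) (idx+4) 'f' ['o', 'u', 'r'] h0 (by simp only [List.length_cons, List.length_nil]; omega)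
  have E0 := chS_of_chL s (idx) 'f' e0
  have e1 := sliceL_head s.toList (idx + 1) (idx+4) 'o' ['u', 'r'] t0 (by simp only [List.length_cons, List.length_nil]; omega)
  have t1 := sliceL_tail s.toList (idx + 1) (idx+4) 'o' ['u', 'r'] t0 (by simp only [List.length_cons, List.length_nil]; omega)
  have E1 := chS_of_chL s (idx + 1) 'o' e1
  have e2 := sliceL_head s.toList (idx + 1 + 1) (idx+4) 'u' ['r'] t1 (by simp only [List.length_cons, List.length_nil]; omega)
  have t2 := sliceL_tail s.toList (idx + 1 + 1) (idx+4) 'u' ['r'] t1 (by simp only [List.length_cons, List.length_nil]; omega)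
  have E2 := chS_of_chL s (idx + 1 + 1) 'u' e2
  have e3 := sliceL_head s.toList (idx + 1 + 1 + 1) (idx+4) 'r' [] t2 (by simp only [List.length_nil]; omega)
  have E3 := chS_of_chL s (idx + 1 + 1 + 1) 'r' e3
  simp only [check_alt, altWalk, E0, E1, E2, E3, accN0, edge0_f, accN11, edge11_o, accN12, edge12_u, accN13, edge13_r, acc14]

lemma fwd5 (s : String) (idx : Int) (h : m s idx "five" = true) :
    check_alt s idx = (true, some "5") := by
  unfold m at h
  rw [show (PySem.Str.len "five") = (4 : Int) from rfl] at h
  have hs := eq_of_beq h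
  have h0 : PySem.List.slice s.toList (some idx) (some (idx+4)) = ['f', 'i', 'v', 'e'] := by
    have h2 := congrArg String.toList hs
    rw [PySem.Str.toList_slice, PySem.Chars.slice_eq_listSlice,
      show "five".toList = ['f', 'i', 'v', 'e'] from rfl] at h2
    exact h2
  have e0 := sliceL_head s.toList (idx) (idx+4) 'f' ['i', 'v', 'e'] h0 (by simp only [List.length_cons, List.length_nil]; omega)
  have t0 := sliceL_tail s.toList (idx) (idx+4) 'f' ['i', 'v', 'e'] h0 (by simp only [List.length_cons, List.length_nil]; omega)
  have E0 := chS_of_chL s (idx) 'f' e0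
  have e1 := sliceL_head s.toList (idx + 1) (idx+4) 'i' ['v', 'e'] t0 (by simp only [List.length_cons, List.length_nil]; omega)
  have t1 := sliceL_tail s.toList (idx + 1) (idx+4) 'i' ['v', 'e'] t0 (by simp only [List.length_cons, List.length_nil]; omega)
  have E1 := chS_of_chL s (idx + 1) 'i' e1
  have e2 := sliceL_head s.toList (idx + 1 + 1) (idx+4) 'v' ['e'] t1 (by simp only [List.length_cons, List.length_nil]; omega)
  have t2 := sliceL_tail s.toList (idx + 1 + 1) (idx+4) 'v' ['e'] t1 (by simp only [List.length_cons, List.length_nil]; omega)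
  have E2 := chS_of_chL s (idx + 1 + 1) 'v' e2
  have e3 := sliceL_head s.toList (idx + 1 + 1 + 1) (idx+4) 'e' [] t2 (by simp only [List.length_nil]; omega)
  have E3 := chS_of_chL s (idx + 1 + 1 + 1) 'e' e3
  simp only [check_alt, altWalk, E0, E1, E2, E3, accN0, edge0_f, accN11, edge11_i, accN15, edge15_v, accN16, edge16_e, acc17]

lemma fwd6 (s : String) (idx : Int) (h : m s idx "six" = true) :
    check_alt s idx = (true, some "6") := by
  unfold m at h
  rw [show (PySem.Str.len "six") = (3 : Int) from rfl] at h
  have hs := eq_of_beq h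
  have h0 : PySem.List.slice s.toList (some idx) (some (idx+3)) = ['s', 'i', 'x'] := by
    have h2 := congrArg String.toList hs
    rw [PySem.Str.toList_slice, PySem.Chars.slice_eq_listSlice,
      show "six".toList = ['s', 'i', 'x'] from rfl] at h2
    exact h2
  have e0 := sliceL_head s.toList (idx) (idx+3) 's' ['i', 'x'] h0 (by simp only [List.length_cons, List.length_nil]; omega)
  have t0 := sliceL_tail s.toList (idx) (idx+3) 's' ['i', 'x'] h0 (by simp only [List.length_cons, List.length_nil]; omega)
  have E0 := chS_of_chL s (idx) 's' e0
  have e1 := sliceL_head s.toList (idx + 1) (idx+3) 'i' ['x'] t0 (by simp only [List.length_cons, List.length_nil]; omega)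
  have t1 := sliceL_tail s.toList (idx + 1) (idx+3) 'i' ['x'] t0 (by simp only [List.length_cons, List.length_nil]; omega)
  have E1 := chS_of_chL s (idx + 1) 'i' e1
  have e2 := sliceL_head s.toList (idx + 1 + 1) (idx+3) 'x' [] t1 (by simp only [List.length_nil]; omega)
  have E2 := chS_of_chL s (idx + 1 + 1) 'x' e2
  simp only [check_alt, altWalk, E0, E1, E2, accN0, edge0_s, accN18, edge18_i, accN19, edge19_x, acc20]

lemma fwd7 (s : String) (idx : Int) (h : m s idx "seven" = true) :
    check_alt s idx = (true, some "7") := by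
  unfold m at h
  rw [show (PySem.Str.len "seven") = (5 : Int) from rfl] at h
  have hs := eq_of_beq h
  have h0 : PySem.List.slice s.toList (some idx) (some (idx+5)) = ['s', 'e', 'v', 'e', 'n'] := by
    have h2 := congrArg String.toList hs
    rw [PySem.Str.toList_slice, PySem.Chars.slice_eq_listSlice,
      show "seven".toList = ['s', 'e', 'v', 'e', 'n'] from rfl] at h2
    exact h2
  have e0 := sliceL_head s.toList (idx) (idx+5) 's' ['e', 'v', 'e', 'n'] h0 (by simp only [List.length_cons, List.length_nil]; omega)
  have t0 := sliceL_tail s.toList (idx) (idx+5) 's' ['e', 'v', 'e', 'n'] h0 (by simp only [List.length_cons, List.length_nil]; omega)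
  have E0 := chS_of_chL s (idx) 's' e0
  have e1 := sliceL_head s.toList (idx + 1) (idx+5) 'e' ['v', 'e', 'n'] t0 (by simp only [List.length_cons, List.length_nil]; omega)
  have t1 := sliceL_tail s.toList (idx + 1) (idx+5) 'e' ['v', 'e', 'n'] t0 (by simp only [List.length_cons, List.length_nil]; omega)
  have E1 := chS_of_chL s (idx + 1) 'e' e1
  have e2 := sliceL_head s.toList (idx + 1 + 1) (idx+5) 'v' ['e', 'n'] t1 (by simp only [List.length_cons, List.length_nil]; omega)
  have t2 := sliceL_tail s.toList (idx + 1 + 1) (idx+5) 'v' ['e', 'n'] t1 (by simp only [List.length_cons, List.length_nil]; omega)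
  have E2 := chS_of_chL s (idx + 1 + 1) 'v' e2
  have e3 := sliceL_head s.toList (idx + 1 + 1 + 1) (idx+5) 'e' ['n'] t2 (by simp only [List.length_cons, List.length_nil]; omega)
  have t3 := sliceL_tail s.toList (idx + 1 + 1 + 1) (idx+5) 'e' ['n'] t2 (by simp only [List.length_cons, List.length_nil]; omega)
  have E3 := chS_of_chL s (idx + 1 + 1 + 1) 'e' e3
  have e4 := sliceL_head s.toList (idx + 1 + 1 + 1 + 1) (idx+5) 'n' [] t3 (by simp only [List.length_nil]; omega)
  have E4 := chS_of_chL s (idx + 1 + 1 + 1 + 1) 'n' e4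
  simp only [check_alt, altWalk, E0, E1, E2, E3, E4, accN0, edge0_s, accN18, edge18_e, accN21, edge21_v, accN22, edge22_e, accN23, edge23_n, acc24]

lemma fwd8 (s : String) (idx : Int) (h : m s idx "eight" = true) :
    check_alt s idx = (true, some "8") := by
  unfold m at h
  rw [show (PySem.Str.len "eight") = (5 : Int) from rfl] at h
  have hs := eq_of_beq h
  have h0 : PySem.List.slice s.toList (some idx) (some (idx+5)) = ['e', 'i', 'g', 'h', 't'] := by
    have h2 := congrArg String.toList hs
    rw [PySem.Str.toList_slice, PySem.Chars.slice_eq_listSlice,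
      show "eight".toList = ['e', 'i', 'g', 'h', 't'] from rfl] at h2
    exact h2
  have e0 := sliceL_head s.toList (idx) (idx+5) 'e' ['i', 'g', 'h', 't'] h0 (by simp only [List.length_cons, List.length_nil]; omega)
  have t0 := sliceL_tail s.toList (idx) (idx+5) 'e' ['i', 'g', 'h', 't'] h0 (by simp only [List.length_cons, List.length_nil]; omega)
  have E0 := chS_of_chL s (idx) 'e' e0
  have e1 := sliceL_head s.toList (idx + 1) (idx+5) 'i' ['g', 'h', 't'] t0 (by simp only [List.length_cons, List.length_nil]; omega)
  have t1 := sliceL_tail s.toList (idx + 1) (idx+5) 'i' ['g', 'h', 't'] t0 (by simp only [List.length_cons, List.length_nil]; omega)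
  have E1 := chS_of_chL s (idx + 1) 'i' e1
  have e2 := sliceL_head s.toList (idx + 1 + 1) (idx+5) 'g' ['h', 't'] t1 (by simp only [List.length_cons, List.length_nil]; omega)
  have t2 := sliceL_tail s.toList (idx + 1 + 1) (idx+5) 'g' ['h', 't'] t1 (by simp only [List.length_cons, List.length_nil]; omega)
  have E2 := chS_of_chL s (idx + 1 + 1) 'g' e2
  have e3 := sliceL_head s.toList (idx + 1 + 1 + 1) (idx+5) 'h' ['t'] t2 (by simp only [List.length_cons, List.length_nil]; omega)
  have t3 := sliceL_tail s.toList (idx + 1 + 1 + 1) (idx+5) 'h' ['t'] t2 (by simp only [List.length_cons, List.length_nil]; omega)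
  have E3 := chS_of_chL s (idx + 1 + 1 + 1) 'h' e3
  have e4 := sliceL_head s.toList (idx + 1 + 1 + 1 + 1) (idx+5) 't' [] t3 (by simp only [List.length_nil]; omega)
  have E4 := chS_of_chL s (idx + 1 + 1 + 1 + 1) 't' e4
  simp only [check_alt, altWalk, E0, E1, E2, E3, E4, accN0, edge0_e, accN25, edge25_i, accN26, edge26_g, accN27, edge27_h, accN28, edge28_t, acc29]

lemma fwd9 (s : String) (idx : Int) (h : m s idx "nine" = true) :
    check_alt s idx = (true, some "9") := by
  unfold m at h
  rw [show (PySem.Str.len "nine") = (4 : Int) from rfl] at h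
  have hs := eq_of_beq h
  have h0 : PySem.List.slice s.toList (some idx) (some (idx+4)) = ['n', 'i', 'n', 'e'] := by
    have h2 := congrArg String.toList hs
    rw [PySem.Str.toList_slice, PySem.Chars.slice_eq_listSlice,
      show "nine".toList = ['n', 'i', 'n', 'e'] from rfl] at h2
    exact h2
  have e0 := sliceL_head s.toList (idx) (idx+4) 'n' ['i', 'n', 'e'] h0 (by simp only [List.length_cons, List.length_nil]; omega)
  have t0 := sliceL_tail s.toList (idx) (idx+4) 'n' ['i', 'n', 'e'] h0 (by simp only [List.length_cons, List.length_nil]; omega)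
  have E0 := chS_of_chL s (idx) 'n' e0
  have e1 := sliceL_head s.toList (idx + 1) (idx+4) 'i' ['n', 'e'] t0 (by simp only [List.length_cons, List.length_nil]; omega)
  have t1 := sliceL_tail s.toList (idx + 1) (idx+4) 'i' ['n', 'e'] t0 (by simp only [List.length_cons, List.length_nil]; omega)
  have E1 := chS_of_chL s (idx + 1) 'i' e1
  have e2 := sliceL_head s.toList (idx + 1 + 1) (idx+4) 'n' ['e'] t1 (by simp only [List.length_cons, List.length_nil]; omega)
  have t2 := sliceL_tail s.toList (idx + 1 + 1) (idx+4) 'n' ['e'] t1 (by simp only [List.length_cons, List.length_nil]; omega)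
  have E2 := chS_of_chL s (idx + 1 + 1) 'n' e2
  have e3 := sliceL_head s.toList (idx + 1 + 1 + 1) (idx+4) 'e' [] t2 (by simp only [List.length_nil]; omega)
  have E3 := chS_of_chL s (idx + 1 + 1 + 1) 'e' e3
  simp only [check_alt, altWalk, E0, E1, E2, E3, accN0, edge0_n, accN30, edge30_i, accN31, edge31_n, accN32, edge32_e, acc33]

-- if no word matches, the walk rejects
lemma walkFalse (s : String) (idx : Int) (H1 : m s idx "one" = false) (H2 : m s idx "two" = false) (H3 : m s idx "three" = false) (H4 : m s idx "four" = false) (H5 : m s idx "five" = false) (H6 : m s idx "six" = false) (H7 : m s idx "seven" = false) (H8 : m s idx "eight" = false) (H9 : m s idx "nine" = false) :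
    check_alt s idx = (false, none) := by
  by_cases c0o : PySem.Str.slice s (some (idx)) (some (idx + 1)) = String.ofList ['o']
  · -- 'o'
    by_cases c1n : PySem.Str.slice s (some (idx + 1)) (some (idx + 1 + 1)) = String.ofList ['n']
    · -- 'n'
      by_cases c2e : PySem.Str.slice s (some (idx + 1 + 1)) (some (idx + 1 + 1 + 1)) = String.ofList ['e']
      · -- 'e'
        have l0 := chL_of_chS s (idx) 'o' c0o
        have K0 := (clamp_succ_of_singleton s.toList (idx) 'o' l0).1
        have l1 := chL_of_chS s (idx + 1) 'n' c1n
        have K1 := (clamp_succ_of_singleton s.toList (idx + 1) 'n' l1).1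
        have l2 := chL_of_chS s (idx + 1 + 1) 'e' c2e
        have K2 := (clamp_succ_of_singleton s.toList (idx + 1 + 1) 'e' l2).1
        have hbb : (idx + 3 : Int) = idx + 1 + 1 + 1 := by ring
        have hcb : PySem.List.clampIdx s.toList.length (idx+3) = PySem.List.clampIdx s.toList.length (idx + 1 + 1 + 1) := by rw [hbb]
        have C0 := sliceL_cons s.toList (idx) (idx+3) 'o' l0 (by omega)
        have C1 := sliceL_cons s.toList (idx + 1) (idx+3) 'n' l1 (by omega)
        have C2 := sliceL_cons s.toList (idx + 1 + 1) (idx+3) 'e' l2 (by omega)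
        have Cfin : PySem.List.slice s.toList (some (idx + 1 + 1 + 1)) (some (idx+3)) = [] := by
          rw [hbb]; exact sliceL_self _ _
        have hfin : PySem.List.slice s.toList (some idx) (some (idx+3)) = ['o', 'n', 'e'] := by
          rw [C0, C1, C2, Cfin]
        have hsW : PySem.Str.slice s (some idx) (some (idx+3)) = "one" := by
          apply String.toList_inj.mp
          rw [PySem.Str.toList_slice, PySem.Chars.slice_eq_listSlice, hfin]
          rfl
        unfold m at H1
        rw [show (PySem.Str.len "one") = (3 : Int) from rfl, hsW] at H1
        simp at H1
      · -- not 'e'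
        have hdead := tn2 (PySem.Str.slice s (some (idx + 1 + 1)) (some (idx + 1 + 1 + 1))) c2e
        simp only [check_alt, altWalk, c0o, c1n, accN0, edge0_o, accN1, edge1_n, accN2, hdead]
    · -- not 'n'
      have hdead := tn1 (PySem.Str.slice s (some (idx + 1)) (some (idx + 1 + 1))) c1n
      simp only [check_alt, altWalk, c0o, accN0, edge0_o, accN1, hdead]
  · -- not 'o'
    by_cases c0t : PySem.Str.slice s (some (idx)) (some (idx + 1)) = String.ofList ['t']
    · -- 't'
      by_cases c4w : PySem.Str.slice s (some (idx + 1)) (some (idx + 1 + 1)) = String.ofList ['w']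
      · -- 'w'
        by_cases c5o : PySem.Str.slice s (some (idx + 1 + 1)) (some (idx + 1 + 1 + 1)) = String.ofList ['o']
        · -- 'o'
          have l0 := chL_of_chS s (idx) 't' c0t
          have K0 := (clamp_succ_of_singleton s.toList (idx) 't' l0).1
          have l1 := chL_of_chS s (idx + 1) 'w' c4w
          have K1 := (clamp_succ_of_singleton s.toList (idx + 1) 'w' l1).1
          have l2 := chL_of_chS s (idx + 1 + 1) 'o' c5o
          have K2 := (clamp_succ_of_singleton s.toList (idx + 1 + 1) 'o' l2).1
          have hbb : (idx + 3 : Int) = idx + 1 + 1 + 1 := by ring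
          have hcb : PySem.List.clampIdx s.toList.length (idx+3) = PySem.List.clampIdx s.toList.length (idx + 1 + 1 + 1) := by rw [hbb]
          have C0 := sliceL_cons s.toList (idx) (idx+3) 't' l0 (by omega)
          have C1 := sliceL_cons s.toList (idx + 1) (idx+3) 'w' l1 (by omega)
          have C2 := sliceL_cons s.toList (idx + 1 + 1) (idx+3) 'o' l2 (by omega)
          have Cfin : PySem.List.slice s.toList (some (idx + 1 + 1 + 1)) (some (idx+3)) = [] := by
            rw [hbb]; exact sliceL_self _ _
          have hfin : PySem.List.slice s.toList (some idx) (some (idx+3)) = ['t', 'w', 'o'] := by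
            rw [C0, C1, C2, Cfin]
          have hsW : PySem.Str.slice s (some idx) (some (idx+3)) = "two" := by
            apply String.toList_inj.mp
            rw [PySem.Str.toList_slice, PySem.Chars.slice_eq_listSlice, hfin]
            rfl
          unfold m at H2
          rw [show (PySem.Str.len "two") = (3 : Int) from rfl, hsW] at H2
          simp at H2
        · -- not 'o'
          have hdead := tn5 (PySem.Str.slice s (some (idx + 1 + 1)) (some (idx + 1 + 1 + 1))) c5o
          simp only [check_alt, altWalk, c0t, c4w, accN0, edge0_t, accN4, edge4_w, accN5, hdead]
      · -- not 'w'
        by_cases c4h : PySem.Str.slice s (some (idx + 1)) (some (idx + 1 + 1)) = String.ofList ['h']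
        · -- 'h'
          by_cases c7r : PySem.Str.slice s (some (idx + 1 + 1)) (some (idx + 1 + 1 + 1)) = String.ofList ['r']
          · -- 'r'
            by_cases c8e : PySem.Str.slice s (some (idx + 1 + 1 + 1)) (some (idx + 1 + 1 + 1 + 1)) = String.ofList ['e']
            · -- 'e'
              by_cases c9e : PySem.Str.slice s (some (idx + 1 + 1 + 1 + 1)) (some (idx + 1 + 1 + 1 + 1 + 1)) = String.ofList ['e']
              · -- 'e'
                have l0 := chL_of_chS s (idx) 't' c0t
                have K0 := (clamp_succ_of_singleton s.toList (idx) 't' l0).1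
                have l1 := chL_of_chS s (idx + 1) 'h' c4h
                have K1 := (clamp_succ_of_singleton s.toList (idx + 1) 'h' l1).1
                have l2 := chL_of_chS s (idx + 1 + 1) 'r' c7r
                have K2 := (clamp_succ_of_singleton s.toList (idx + 1 + 1) 'r' l2).1
                have l3 := chL_of_chS s (idx + 1 + 1 + 1) 'e' c8e
                have K3 := (clamp_succ_of_singleton s.toList (idx + 1 + 1 + 1) 'e' l3).1
                have l4 := chL_of_chS s (idx + 1 + 1 + 1 + 1) 'e' c9e
                have K4 := (clamp_succ_of_singleton s.toList (idx + 1 + 1 + 1 + 1) 'e' l4).1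
                have hbb : (idx + 5 : Int) = idx + 1 + 1 + 1 + 1 + 1 := by ring
                have hcb : PySem.List.clampIdx s.toList.length (idx+5) = PySem.List.clampIdx s.toList.length (idx + 1 + 1 + 1 + 1 + 1) := by rw [hbb]
                have C0 := sliceL_cons s.toList (idx) (idx+5) 't' l0 (by omega)
                have C1 := sliceL_cons s.toList (idx + 1) (idx+5) 'h' l1 (by omega)
                have C2 := sliceL_cons s.toList (idx + 1 + 1) (idx+5) 'r' l2 (by omega)
                have C3 := sliceL_cons s.toList (idx + 1 + 1 + 1) (idx+5) 'e' l3 (by omega)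
                have C4 := sliceL_cons s.toList (idx + 1 + 1 + 1 + 1) (idx+5) 'e' l4 (by omega)
                have Cfin : PySem.List.slice s.toList (some (idx + 1 + 1 + 1 + 1 + 1)) (some (idx+5)) = [] := by
                  rw [hbb]; exact sliceL_self _ _
                have hfin : PySem.List.slice s.toList (some idx) (some (idx+5)) = ['t', 'h', 'r', 'e', 'e'] := by
                  rw [C0, C1, C2, C3, C4, Cfin]
                have hsW : PySem.Str.slice s (some idx) (some (idx+5)) = "three" := by
                  apply String.toList_inj.mp
                  rw [PySem.Str.toList_slice, PySem.Chars.slice_eq_listSlice, hfin]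
                  rfl
                unfold m at H3
                rw [show (PySem.Str.len "three") = (5 : Int) from rfl, hsW] at H3
                simp at H3
              · -- not 'e'
                have hdead := tn9 (PySem.Str.slice s (some (idx + 1 + 1 + 1 + 1)) (some (idx + 1 + 1 + 1 + 1 + 1))) c9e
                simp only [check_alt, altWalk, c0t, c4h, c7r, c8e, accN0, edge0_t, accN4, edge4_h, accN7, edge7_r, accN8, edge8_e, accN9, hdead]
            · -- not 'e'
              have hdead := tn8 (PySem.Str.slice s (some (idx + 1 + 1 + 1)) (some (idx + 1 + 1 + 1 + 1))) c8e
              simp only [check_alt, altWalk, c0t, c4h, c7r, accN0, edge0_t, accN4, edge4_h, accN7, edge7_r, accN8, hdead]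
          · -- not 'r'
            have hdead := tn7 (PySem.Str.slice s (some (idx + 1 + 1)) (some (idx + 1 + 1 + 1))) c7r
            simp only [check_alt, altWalk, c0t, c4h, accN0, edge0_t, accN4, edge4_h, accN7, hdead]
        · -- not 'h'
          have hdead := tn4 (PySem.Str.slice s (some (idx + 1)) (some (idx + 1 + 1))) c4w c4h
          simp only [check_alt, altWalk, c0t, accN0, edge0_t, accN4, hdead]
    · -- not 't'
      by_cases c0f : PySem.Str.slice s (some (idx)) (some (idx + 1)) = String.ofList ['f']
      · -- 'f'
        by_cases c11o : PySem.Str.slice s (some (idx + 1)) (some (idx + 1 + 1)) = String.ofList ['o']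
        · -- 'o'
          by_cases c12u : PySem.Str.slice s (some (idx + 1 + 1)) (some (idx + 1 + 1 + 1)) = String.ofList ['u']
          · -- 'u'
            by_cases c13r : PySem.Str.slice s (some (idx + 1 + 1 + 1)) (some (idx + 1 + 1 + 1 + 1)) = String.ofList ['r']
            · -- 'r'
              have l0 := chL_of_chS s (idx) 'f' c0f
              have K0 := (clamp_succ_of_singleton s.toList (idx) 'f' l0).1
              have l1 := chL_of_chS s (idx + 1) 'o' c11o
              have K1 := (clamp_succ_of_singleton s.toList (idx + 1) 'o' l1).1
              have l2 := chL_of_chS s (idx + 1 + 1) 'u' c12u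
              have K2 := (clamp_succ_of_singleton s.toList (idx + 1 + 1) 'u' l2).1
              have l3 := chL_of_chS s (idx + 1 + 1 + 1) 'r' c13r
              have K3 := (clamp_succ_of_singleton s.toList (idx + 1 + 1 + 1) 'r' l3).1
              have hbb : (idx + 4 : Int) = idx + 1 + 1 + 1 + 1 := by ring
              have hcb : PySem.List.clampIdx s.toList.length (idx+4) = PySem.List.clampIdx s.toList.length (idx + 1 + 1 + 1 + 1) := by rw [hbb]
              have C0 := sliceL_cons s.toList (idx) (idx+4) 'f' l0 (by omega)
              have C1 := sliceL_cons s.toList (idx + 1) (idx+4) 'o' l1 (by omega)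
              have C2 := sliceL_cons s.toList (idx + 1 + 1) (idx+4) 'u' l2 (by omega)
              have C3 := sliceL_cons s.toList (idx + 1 + 1 + 1) (idx+4) 'r' l3 (by omega)
              have Cfin : PySem.List.slice s.toList (some (idx + 1 + 1 + 1 + 1)) (some (idx+4)) = [] := by
                rw [hbb]; exact sliceL_self _ _
              have hfin : PySem.List.slice s.toList (some idx) (some (idx+4)) = ['f', 'o', 'u', 'r'] := by
                rw [C0, C1, C2, C3, Cfin]
              have hsW : PySem.Str.slice s (some idx) (some (idx+4)) = "four" := by
                apply String.toList_inj.mp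
                rw [PySem.Str.toList_slice, PySem.Chars.slice_eq_listSlice, hfin]
                rfl
              unfold m at H4
              rw [show (PySem.Str.len "four") = (4 : Int) from rfl, hsW] at H4
              simp at H4
            · -- not 'r'
              have hdead := tn13 (PySem.Str.slice s (some (idx + 1 + 1 + 1)) (some (idx + 1 + 1 + 1 + 1))) c13r
              simp only [check_alt, altWalk, c0f, c11o, c12u, accN0, edge0_f, accN11, edge11_o, accN12, edge12_u, accN13, hdead]
          · -- not 'u'
            have hdead := tn12 (PySem.Str.slice s (some (idx + 1 + 1)) (some (idx + 1 + 1 + 1))) c12u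
            simp only [check_alt, altWalk, c0f, c11o, accN0, edge0_f, accN11, edge11_o, accN12, hdead]
        · -- not 'o'
          by_cases c11i : PySem.Str.slice s (some (idx + 1)) (some (idx + 1 + 1)) = String.ofList ['i']
          · -- 'i'
            by_cases c15v : PySem.Str.slice s (some (idx + 1 + 1)) (some (idx + 1 + 1 + 1)) = String.ofList ['v']
            · -- 'v'
              by_cases c16e : PySem.Str.slice s (some (idx + 1 + 1 + 1)) (some (idx + 1 + 1 + 1 + 1)) = String.ofList ['e']
              · -- 'e'
                have l0 := chL_of_chS s (idx) 'f' c0f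
                have K0 := (clamp_succ_of_singleton s.toList (idx) 'f' l0).1
                have l1 := chL_of_chS s (idx + 1) 'i' c11i
                have K1 := (clamp_succ_of_singleton s.toList (idx + 1) 'i' l1).1
                have l2 := chL_of_chS s (idx + 1 + 1) 'v' c15v
                have K2 := (clamp_succ_of_singleton s.toList (idx + 1 + 1) 'v' l2).1
                have l3 := chL_of_chS s (idx + 1 + 1 + 1) 'e' c16e
                have K3 := (clamp_succ_of_singleton s.toList (idx + 1 + 1 + 1) 'e' l3).1
                have hbb : (idx + 4 : Int) = idx + 1 + 1 + 1 + 1 := by ring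
                have hcb : PySem.List.clampIdx s.toList.length (idx+4) = PySem.List.clampIdx s.toList.length (idx + 1 + 1 + 1 + 1) := by rw [hbb]
                have C0 := sliceL_cons s.toList (idx) (idx+4) 'f' l0 (by omega)
                have C1 := sliceL_cons s.toList (idx + 1) (idx+4) 'i' l1 (by omega)
                have C2 := sliceL_cons s.toList (idx + 1 + 1) (idx+4) 'v' l2 (by omega)
                have C3 := sliceL_cons s.toList (idx + 1 + 1 + 1) (idx+4) 'e' l3 (by omega)
                have Cfin : PySem.List.slice s.toList (some (idx + 1 + 1 + 1 + 1)) (some (idx+4)) = [] := by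
                  rw [hbb]; exact sliceL_self _ _
                have hfin : PySem.List.slice s.toList (some idx) (some (idx+4)) = ['f', 'i', 'v', 'e'] := by
                  rw [C0, C1, C2, C3, Cfin]
                have hsW : PySem.Str.slice s (some idx) (some (idx+4)) = "five" := by
                  apply String.toList_inj.mp
                  rw [PySem.Str.toList_slice, PySem.Chars.slice_eq_listSlice, hfin]
                  rfl
                unfold m at H5
                rw [show (PySem.Str.len "five") = (4 : Int) from rfl, hsW] at H5
                simp at H5
              · -- not 'e'
                have hdead := tn16 (PySem.Str.slice s (some (idx + 1 + 1 + 1)) (some (idx + 1 + 1 + 1 + 1))) c16e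
                simp only [check_alt, altWalk, c0f, c11i, c15v, accN0, edge0_f, accN11, edge11_i, accN15, edge15_v, accN16, hdead]
            · -- not 'v'
              have hdead := tn15 (PySem.Str.slice s (some (idx + 1 + 1)) (some (idx + 1 + 1 + 1))) c15v
              simp only [check_alt, altWalk, c0f, c11i, accN0, edge0_f, accN11, edge11_i, accN15, hdead]
          · -- not 'i'
            have hdead := tn11 (PySem.Str.slice s (some (idx + 1)) (some (idx + 1 + 1))) c11o c11i
            simp only [check_alt, altWalk, c0f, accN0, edge0_f, accN11, hdead]
      · -- not 'f'
        by_cases c0s : PySem.Str.slice s (some (idx)) (some (idx + 1)) = String.ofList ['s']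
        · -- 's'
          by_cases c18i : PySem.Str.slice s (some (idx + 1)) (some (idx + 1 + 1)) = String.ofList ['i']
          · -- 'i'
            by_cases c19x : PySem.Str.slice s (some (idx + 1 + 1)) (some (idx + 1 + 1 + 1)) = String.ofList ['x']
            · -- 'x'
              have l0 := chL_of_chS s (idx) 's' c0s
              have K0 := (clamp_succ_of_singleton s.toList (idx) 's' l0).1
              have l1 := chL_of_chS s (idx + 1) 'i' c18i
              have K1 := (clamp_succ_of_singleton s.toList (idx + 1) 'i' l1).1
              have l2 := chL_of_chS s (idx + 1 + 1) 'x' c19x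
              have K2 := (clamp_succ_of_singleton s.toList (idx + 1 + 1) 'x' l2).1
              have hbb : (idx + 3 : Int) = idx + 1 + 1 + 1 := by ring
              have hcb : PySem.List.clampIdx s.toList.length (idx+3) = PySem.List.clampIdx s.toList.length (idx + 1 + 1 + 1) := by rw [hbb]
              have C0 := sliceL_cons s.toList (idx) (idx+3) 's' l0 (by omega)
              have C1 := sliceL_cons s.toList (idx + 1) (idx+3) 'i' l1 (by omega)
              have C2 := sliceL_cons s.toList (idx + 1 + 1) (idx+3) 'x' l2 (by omega)
              have Cfin : PySem.List.slice s.toList (some (idx + 1 + 1 + 1)) (some (idx+3)) = [] := by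
                rw [hbb]; exact sliceL_self _ _
              have hfin : PySem.List.slice s.toList (some idx) (some (idx+3)) = ['s', 'i', 'x'] := by
                rw [C0, C1, C2, Cfin]
              have hsW : PySem.Str.slice s (some idx) (some (idx+3)) = "six" := by
                apply String.toList_inj.mp
                rw [PySem.Str.toList_slice, PySem.Chars.slice_eq_listSlice, hfin]
                rfl
              unfold m at H6
              rw [show (PySem.Str.len "six") = (3 : Int) from rfl, hsW] at H6
              simp at H6
            · -- not 'x'
              have hdead := tn19 (PySem.Str.slice s (some (idx + 1 + 1)) (some (idx + 1 + 1 + 1))) c19x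
              simp only [check_alt, altWalk, c0s, c18i, accN0, edge0_s, accN18, edge18_i, accN19, hdead]
          · -- not 'i'
            by_cases c18e : PySem.Str.slice s (some (idx + 1)) (some (idx + 1 + 1)) = String.ofList ['e']
            · -- 'e'
              by_cases c21v : PySem.Str.slice s (some (idx + 1 + 1)) (some (idx + 1 + 1 + 1)) = String.ofList ['v']
              · -- 'v'
                by_cases c22e : PySem.Str.slice s (some (idx + 1 + 1 + 1)) (some (idx + 1 + 1 + 1 + 1)) = String.ofList ['e']
                · -- 'e'
                  by_cases c23n : PySem.Str.slice s (some (idx + 1 + 1 + 1 + 1)) (some (idx + 1 + 1 + 1 + 1 + 1)) = String.ofList ['n']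
                  · -- 'n'
                    have l0 := chL_of_chS s (idx) 's' c0s
                    have K0 := (clamp_succ_of_singleton s.toList (idx) 's' l0).1
                    have l1 := chL_of_chS s (idx + 1) 'e' c18e
                    have K1 := (clamp_succ_of_singleton s.toList (idx + 1) 'e' l1).1
                    have l2 := chL_of_chS s (idx + 1 + 1) 'v' c21v
                    have K2 := (clamp_succ_of_singleton s.toList (idx + 1 + 1) 'v' l2).1
                    have l3 := chL_of_chS s (idx + 1 + 1 + 1) 'e' c22e
                    have K3 := (clamp_succ_of_singleton s.toList (idx + 1 + 1 + 1) 'e' l3).1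
                    have l4 := chL_of_chS s (idx + 1 + 1 + 1 + 1) 'n' c23n
                    have K4 := (clamp_succ_of_singleton s.toList (idx + 1 + 1 + 1 + 1) 'n' l4).1
                    have hbb : (idx + 5 : Int) = idx + 1 + 1 + 1 + 1 + 1 := by ring
                    have hcb : PySem.List.clampIdx s.toList.length (idx+5) = PySem.List.clampIdx s.toList.length (idx + 1 + 1 + 1 + 1 + 1) := by rw [hbb]
                    have C0 := sliceL_cons s.toList (idx) (idx+5) 's' l0 (by omega)
                    have C1 := sliceL_cons s.toList (idx + 1) (idx+5) 'e' l1 (by omega)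
                    have C2 := sliceL_cons s.toList (idx + 1 + 1) (idx+5) 'v' l2 (by omega)
                    have C3 := sliceL_cons s.toList (idx + 1 + 1 + 1) (idx+5) 'e' l3 (by omega)
                    have C4 := sliceL_cons s.toList (idx + 1 + 1 + 1 + 1) (idx+5) 'n' l4 (by omega)
                    have Cfin : PySem.List.slice s.toList (some (idx + 1 + 1 + 1 + 1 + 1)) (some (idx+5)) = [] := by
                      rw [hbb]; exact sliceL_self _ _
                    have hfin : PySem.List.slice s.toList (some idx) (some (idx+5)) = ['s', 'e', 'v', 'e', 'n'] := by
                      rw [C0, C1, C2, C3, C4, Cfin]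
                    have hsW : PySem.Str.slice s (some idx) (some (idx+5)) = "seven" := by
                      apply String.toList_inj.mp
                      rw [PySem.Str.toList_slice, PySem.Chars.slice_eq_listSlice, hfin]
                      rfl
                    unfold m at H7
                    rw [show (PySem.Str.len "seven") = (5 : Int) from rfl, hsW] at H7
                    simp at H7
                  · -- not 'n'
                    have hdead := tn23 (PySem.Str.slice s (some (idx + 1 + 1 + 1 + 1)) (some (idx + 1 + 1 + 1 + 1 + 1))) c23n
                    simp only [check_alt, altWalk, c0s, c18e, c21v, c22e, accN0, edge0_s, accN18, edge18_e, accN21, edge21_v, accN22, edge22_e, accN23, hdead]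
                · -- not 'e'
                  have hdead := tn22 (PySem.Str.slice s (some (idx + 1 + 1 + 1)) (some (idx + 1 + 1 + 1 + 1))) c22e
                  simp only [check_alt, altWalk, c0s, c18e, c21v, accN0, edge0_s, accN18, edge18_e, accN21, edge21_v, accN22, hdead]
              · -- not 'v'
                have hdead := tn21 (PySem.Str.slice s (some (idx + 1 + 1)) (some (idx + 1 + 1 + 1))) c21v
                simp only [check_alt, altWalk, c0s, c18e, accN0, edge0_s, accN18, edge18_e, accN21, hdead]
            · -- not 'e'
              have hdead := tn18 (PySem.Str.slice s (some (idx + 1)) (some (idx + 1 + 1))) c18i c18e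
              simp only [check_alt, altWalk, c0s, accN0, edge0_s, accN18, hdead]
        · -- not 's'
          by_cases c0e : PySem.Str.slice s (some (idx)) (some (idx + 1)) = String.ofList ['e']
          · -- 'e'
            by_cases c25i : PySem.Str.slice s (some (idx + 1)) (some (idx + 1 + 1)) = String.ofList ['i']
            · -- 'i'
              by_cases c26g : PySem.Str.slice s (some (idx + 1 + 1)) (some (idx + 1 + 1 + 1)) = String.ofList ['g']
              · -- 'g'
                by_cases c27h : PySem.Str.slice s (some (idx + 1 + 1 + 1)) (some (idx + 1 + 1 + 1 + 1)) = String.ofList ['h']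
                · -- 'h'
                  by_cases c28t : PySem.Str.slice s (some (idx + 1 + 1 + 1 + 1)) (some (idx + 1 + 1 + 1 + 1 + 1)) = String.ofList ['t']
                  · -- 't'
                    have l0 := chL_of_chS s (idx) 'e' c0e
                    have K0 := (clamp_succ_of_singleton s.toList (idx) 'e' l0).1
                    have l1 := chL_of_chS s (idx + 1) 'i' c25i
                    have K1 := (clamp_succ_of_singleton s.toList (idx + 1) 'i' l1).1
                    have l2 := chL_of_chS s (idx + 1 + 1) 'g' c26g
                    have K2 := (clamp_succ_of_singleton s.toList (idx + 1 + 1) 'g' l2).1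
                    have l3 := chL_of_chS s (idx + 1 + 1 + 1) 'h' c27h
                    have K3 := (clamp_succ_of_singleton s.toList (idx + 1 + 1 + 1) 'h' l3).1
                    have l4 := chL_of_chS s (idx + 1 + 1 + 1 + 1) 't' c28t
                    have K4 := (clamp_succ_of_singleton s.toList (idx + 1 + 1 + 1 + 1) 't' l4).1
                    have hbb : (idx + 5 : Int) = idx + 1 + 1 + 1 + 1 + 1 := by ring
                    have hcb : PySem.List.clampIdx s.toList.length (idx+5) = PySem.List.clampIdx s.toList.length (idx + 1 + 1 + 1 + 1 + 1) := by rw [hbb]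
                    have C0 := sliceL_cons s.toList (idx) (idx+5) 'e' l0 (by omega)
                    have C1 := sliceL_cons s.toList (idx + 1) (idx+5) 'i' l1 (by omega)
                    have C2 := sliceL_cons s.toList (idx + 1 + 1) (idx+5) 'g' l2 (by omega)
                    have C3 := sliceL_cons s.toList (idx + 1 + 1 + 1) (idx+5) 'h' l3 (by omega)
                    have C4 := sliceL_cons s.toList (idx + 1 + 1 + 1 + 1) (idx+5) 't' l4 (by omega)
                    have Cfin : PySem.List.slice s.toList (some (idx + 1 + 1 + 1 + 1 + 1)) (some (idx+5)) = [] := by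
                      rw [hbb]; exact sliceL_self _ _
                    have hfin : PySem.List.slice s.toList (some idx) (some (idx+5)) = ['e', 'i', 'g', 'h', 't'] := by
                      rw [C0, C1, C2, C3, C4, Cfin]
                    have hsW : PySem.Str.slice s (some idx) (some (idx+5)) = "eight" := by
                      apply String.toList_inj.mp
                      rw [PySem.Str.toList_slice, PySem.Chars.slice_eq_listSlice, hfin]
                      rfl
                    unfold m at H8
                    rw [show (PySem.Str.len "eight") = (5 : Int) from rfl, hsW] at H8
                    simp at H8
                  · -- not 't'
                    have hdead := tn28 (PySem.Str.slice s (some (idx + 1 + 1 + 1 + 1)) (some (idx + 1 + 1 + 1 + 1 + 1))) c28t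
                    simp only [check_alt, altWalk, c0e, c25i, c26g, c27h, accN0, edge0_e, accN25, edge25_i, accN26, edge26_g, accN27, edge27_h, accN28, hdead]
                · -- not 'h'
                  have hdead := tn27 (PySem.Str.slice s (some (idx + 1 + 1 + 1)) (some (idx + 1 + 1 + 1 + 1))) c27h
                  simp only [check_alt, altWalk, c0e, c25i, c26g, accN0, edge0_e, accN25, edge25_i, accN26, edge26_g, accN27, hdead]
              · -- not 'g'
                have hdead := tn26 (PySem.Str.slice s (some (idx + 1 + 1)) (some (idx + 1 + 1 + 1))) c26g
                simp only [check_alt, altWalk, c0e, c25i, accN0, edge0_e, accN25, edge25_i, accN26, hdead]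
            · -- not 'i'
              have hdead := tn25 (PySem.Str.slice s (some (idx + 1)) (some (idx + 1 + 1))) c25i
              simp only [check_alt, altWalk, c0e, accN0, edge0_e, accN25, hdead]
          · -- not 'e'
            by_cases c0n : PySem.Str.slice s (some (idx)) (some (idx + 1)) = String.ofList ['n']
            · -- 'n'
              by_cases c30i : PySem.Str.slice s (some (idx + 1)) (some (idx + 1 + 1)) = String.ofList ['i']
              · -- 'i'
                by_cases c31n : PySem.Str.slice s (some (idx + 1 + 1)) (some (idx + 1 + 1 + 1)) = String.ofList ['n']
                · -- 'n'
                  by_cases c32e : PySem.Str.slice s (some (idx + 1 + 1 + 1)) (some (idx + 1 + 1 + 1 + 1)) = String.ofList ['e']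
                  · -- 'e'
                    have l0 := chL_of_chS s (idx) 'n' c0n
                    have K0 := (clamp_succ_of_singleton s.toList (idx) 'n' l0).1
                    have l1 := chL_of_chS s (idx + 1) 'i' c30i
                    have K1 := (clamp_succ_of_singleton s.toList (idx + 1) 'i' l1).1
                    have l2 := chL_of_chS s (idx + 1 + 1) 'n' c31n
                    have K2 := (clamp_succ_of_singleton s.toList (idx + 1 + 1) 'n' l2).1
                    have l3 := chL_of_chS s (idx + 1 + 1 + 1) 'e' c32e
                    have K3 := (clamp_succ_of_singleton s.toList (idx + 1 + 1 + 1) 'e' l3).1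
                    have hbb : (idx + 4 : Int) = idx + 1 + 1 + 1 + 1 := by ring
                    have hcb : PySem.List.clampIdx s.toList.length (idx+4) = PySem.List.clampIdx s.toList.length (idx + 1 + 1 + 1 + 1) := by rw [hbb]
                    have C0 := sliceL_cons s.toList (idx) (idx+4) 'n' l0 (by omega)
                    have C1 := sliceL_cons s.toList (idx + 1) (idx+4) 'i' l1 (by omega)
                    have C2 := sliceL_cons s.toList (idx + 1 + 1) (idx+4) 'n' l2 (by omega)
                    have C3 := sliceL_cons s.toList (idx + 1 + 1 + 1) (idx+4) 'e' l3 (by omega)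
                    have Cfin : PySem.List.slice s.toList (some (idx + 1 + 1 + 1 + 1)) (some (idx+4)) = [] := by
                      rw [hbb]; exact sliceL_self _ _
                    have hfin : PySem.List.slice s.toList (some idx) (some (idx+4)) = ['n', 'i', 'n', 'e'] := by
                      rw [C0, C1, C2, C3, Cfin]
                    have hsW : PySem.Str.slice s (some idx) (some (idx+4)) = "nine" := by
                      apply String.toList_inj.mp
                      rw [PySem.Str.toList_slice, PySem.Chars.slice_eq_listSlice, hfin]
                      rfl
                    unfold m at H9
                    rw [show (PySem.Str.len "nine") = (4 : Int) from rfl, hsW] at H9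
                    simp at H9
                  · -- not 'e'
                    have hdead := tn32 (PySem.Str.slice s (some (idx + 1 + 1 + 1)) (some (idx + 1 + 1 + 1 + 1))) c32e
                    simp only [check_alt, altWalk, c0n, c30i, c31n, accN0, edge0_n, accN30, edge30_i, accN31, edge31_n, accN32, hdead]
                · -- not 'n'
                  have hdead := tn31 (PySem.Str.slice s (some (idx + 1 + 1)) (some (idx + 1 + 1 + 1))) c31n
                  simp only [check_alt, altWalk, c0n, c30i, accN0, edge0_n, accN30, edge30_i, accN31, hdead]
              · -- not 'i'
                have hdead := tn30 (PySem.Str.slice s (some (idx + 1)) (some (idx + 1 + 1))) c30i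
                simp only [check_alt, altWalk, c0n, accN0, edge0_n, accN30, hdead]
            · -- not 'n'
              have hdead := tn0 (PySem.Str.slice s (some (idx)) (some (idx + 1))) c0o c0t c0f c0s c0e c0n
              simp only [check_alt, altWalk, accN0, hdead]

-- ===== VERDICT (by name: the statement is the Claim_ definition above) =====
theorem check_spec : Claim_equal_check := by
  intro s idx _
  unfold Spec_check
  rw [check_eq]
  cases h1 : m s idx "one" with
  | true => simp only [if_true, fwd1 s idx h1]
  | false =>
  cases h2 : m s idx "two" with
  | true => simp only [Bool.false_eq_true, if_false, if_true, fwd2 s idx h2]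
  | false =>
  cases h3 : m s idx "three" with
  | true => simp only [Bool.false_eq_true, if_false, if_true, fwd3 s idx h3]
  | false =>
  cases h4 : m s idx "four" with
  | true => simp only [Bool.false_eq_true, if_false, if_true, fwd4 s idx h4]
  | false =>
  cases h5 : m s idx "five" with
  | true => simp only [Bool.false_eq_true, if_false, if_true, fwd5 s idx h5]
  | false =>
  cases h6 : m s idx "six" with
  | true => simp only [Bool.false_eq_true, if_false, if_true, fwd6 s idx h6]
  | false =>
  cases h7 : m s idx "seven" with
  | true => simp only [Bool.false_eq_true, if_false, if_true, fwd7 s idx h7]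
  | false =>
  cases h8 : m s idx "eight" with
  | true => simp only [Bool.false_eq_true, if_false, if_true, fwd8 s idx h8]
  | false =>
  cases h9 : m s idx "nine" with
  | true => simp only [Bool.false_eq_true, if_false, if_true, fwd9 s idx h9]
  | false =>
  simp only [Bool.false_eq_true, if_false, walkFalse s idx h1 h2 h3 h4 h5 h6 h7 h8 h9]
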